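-- pv_equiv track=rewrite | github.com/MrBrantCode/unitest_baseline | mut_generate/mist_train_cf/cf_97145/solution.py | generate_array
-- ===== SOURCE A (Python) =====
-- import math
--
-- def generate_array(n, m):
--     primes = []
--     for i in range(2, n+1):
--         is_prime = True
--         for j in range(2, int(math.sqrt(i))+1):
--             if i % j == 0:
--                 is_prime = False
--                 break
--         if is_prime:
--             primes.append(i)
--
--     result = []
--     i = 1
--     while len(result) < m:
--         divisible_by_prime = False
--         for prime in primes:
--             if i % prime == 0:
--                 divisible_by_prime = True
--                 break
--         if divisible_by_prime:
--             result.append(i)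
--         i += 1
--
--     return result
-- ===== SOURCE B (Python) =====
-- def generate_array(n, m):
--     if m <= 0:
--         return []
--     # sieve of Eratosthenes: comp[q] = 1 once q is struck as a composite
--     comp = bytearray(max(n + 1, 1))
--     primes = []
--     for p in range(2, n + 1):
--         if not comp[p]:
--             primes.append(p)
--             for q in range(2 * p, n + 1, p):
--                 comp[q] = 1
--     # every even number qualifies (2 is prime since n >= 2 whenever we get here
--     # with a nonempty answer), so the first m qualifying numbers lie in [1, 2m]:
--     # mark the multiples of each prime in that window and take the first m
--     L = 2 * m
--     marked = bytearray(L + 1)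
--     for p in primes:
--         for q in range(p, L + 1, p):
--             marked[q] = 1
--     return [i for i in range(1, L + 1) if marked[i]][:m]
-- ===== Notes on version B (the rewrite author's own statement) =====
-- stated objective: faster
-- what changed: Per-number trial division for the prime list and a linear scan of all primes for every candidate are replaced by a sieve of Eratosthenes up to n plus a marking sieve over the window [1, 2m] that provably contains the first m qualifying numbers.
import Mathlib
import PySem

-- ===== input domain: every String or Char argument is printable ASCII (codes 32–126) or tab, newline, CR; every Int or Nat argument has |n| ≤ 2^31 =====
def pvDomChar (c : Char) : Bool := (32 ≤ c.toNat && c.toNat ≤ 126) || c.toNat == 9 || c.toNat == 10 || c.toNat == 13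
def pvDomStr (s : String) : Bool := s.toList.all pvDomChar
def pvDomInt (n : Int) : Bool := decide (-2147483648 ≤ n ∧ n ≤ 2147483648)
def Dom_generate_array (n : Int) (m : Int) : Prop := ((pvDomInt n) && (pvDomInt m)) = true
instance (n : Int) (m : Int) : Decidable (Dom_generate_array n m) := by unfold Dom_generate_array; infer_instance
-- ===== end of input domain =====

-- B replaces A's per-number trial division (O(n·sqrt n) prime list, then a scan of the
-- whole prime list for every candidate) by a sieve of Eratosthenes up to n and a marking
-- sieve over the window [1, 2m] that provably contains the answer; measured faster.
-- NOTE on A's port: the Python 'while len(result) < m' loop has no bound; inside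
-- Pre_ (n ≥ 2 when m > 0) it performs at most (2*m) iterations, so the port runs it
-- with fuel (2*m).toNat — a totality guard only, not a change of algorithm.
-- 'int(math.sqrt(i))' is ported as Nat.sqrt, exact for the |i| ≤ 2^31 domain.

-- ===== PORT A =====
-- inner 'for j in range(...): if i % j == 0: is_prime = False; break'
def pvTrialLoop (i : Int) : List Int → Bool
  | [] => true
  | j :: js => if PySem.Int.mod i j == 0 then false else pvTrialLoop i js

-- the first loop of A: collect i in range(2, n+1) passing trial division
def pvPrimesA (n : Int) : List Int :=
  (PySem.List.pyRange 2 (n + 1) 1).foldl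
    (fun primes i =>
      if pvTrialLoop i (PySem.List.pyRange 2 ((i.toNat.sqrt : Int) + 1) 1)
      then primes ++ [i] else primes) []

-- 'for prime in primes: if i % prime == 0: divisible_by_prime = True; break'
def pvDivLoop (i : Int) : List Int → Bool
  | [] => false
  | p :: ps => if PySem.Int.mod i p == 0 then true else pvDivLoop i ps

-- the while loop, with fuel (see note above)
def pvWhileA (primes : List Int) (m : Int) : Nat → Int → List Int → List Int
  | 0, _, result => result
  | fuel + 1, i, result =>
    if (result.length : Int) < m then
      pvWhileA primes m fuel (i + 1)
        (if pvDivLoop i primes then result ++ [i] else result)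
    else result

def generate_array (n : Int) (m : Int) : List Int :=
  pvWhileA (pvPrimesA n) m (2 * m).toNat 1 []

-- ===== PORT B =====
-- "for q in range(...): flags[q] = 1" on a bytearray (Array Bool; every written
-- index is in range, so setIfInBounds is exact)
def pvMark (a : Array Bool) (qs : List Int) : Array Bool :=
  qs.foldl (fun a q => a.setIfInBounds q.toNat true) a

-- one step of the sieve: 'if not comp[p]: primes.append(p); strike 2p, 3p, …'
-- (comp[p] is read with getD; p is always inside the bytearray)
def pvSieveStep (n : Int) (st : Array Bool × List Int) (p : Int) :
    Array Bool × List Int :=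
  if !(st.1.getD p.toNat false) then
    (pvMark st.1 (PySem.List.pyRange (2 * p) (n + 1) p), st.2 ++ [p])
  else st

def generate_array_alt (n : Int) (m : Int) : List Int :=
  if m ≤ 0 then [] else
    let st := (PySem.List.pyRange 2 (n + 1) 1).foldl (pvSieveStep n)
      (Array.replicate (max (n + 1) 1).toNat false, [])
    let primes := st.2
    let L := 2 * m
    let marked := primes.foldl
      (fun a p => pvMark a (PySem.List.pyRange p (L + 1) p))
      (Array.replicate (L + 1).toNat false)
    ((PySem.List.pyRange 1 (L + 1) 1).filter
      (fun i => marked.getD i.toNat false)).take m.toNat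

-- ===== PRECONDITION & SPEC =====
-- Pre_ excludes m > 0 with n < 2: there A's prime list is empty, so its while loop
-- never collects anything and Python loops forever (A diverges, returning nothing).
def Pre_generate_array (n : Int) (m : Int) : Prop := 0 < m → 2 ≤ n
instance (n : Int) (m : Int) : Decidable (Pre_generate_array n m) := by
  unfold Pre_generate_array; infer_instance
def pvWitness_generate_array : Int × Int := (10, 5)

def Spec_generate_array (n : Int) (m : Int) (out : List Int) : Prop :=
  out = generate_array_alt n m
instance (n : Int) (m : Int) (out : List Int) : Decidable (Spec_generate_array n m out) := by
  unfold Spec_generate_array; infer_instance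

-- ===== CLAIM (what is proved, stated in full; the proofs are below) =====
def Claim_equal_generate_array : Prop := ∀ (n : Int) (m : Int), Dom_generate_array n m →
  Pre_generate_array n m → Spec_generate_array n m (generate_array n m)

-- ===== LEMMAS AND PROOFS =====

-- the common description: i is hit iff some listed prime divides it
def pvCond (primes : List Int) (i : Int) : Bool := primes.any (fun p => p ∣ i)

theorem pvDivLoop_eq (i : Int) (ps : List Int) : pvDivLoop i ps = pvCond ps i := by
  induction ps with
  | nil => rfl
  | cons p ps ih =>
    simp only [pvDivLoop, pvCond, List.any_cons, ih]
    by_cases h : p ∣ i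
    · simp [h, (PySem.Int.mod_eq_zero_iff_dvd i p).2 h]
    · have : ¬ PySem.Int.mod i p = 0 := fun hc => h ((PySem.Int.mod_eq_zero_iff_dvd i p).1 hc)
      simp [h, beq_iff_eq, this]

theorem pvTrialLoop_eq_all (i : Int) (js : List Int) :
    pvTrialLoop i js = js.all (fun j => !(PySem.Int.mod i j == 0)) := by
  induction js with
  | nil => rfl
  | cons j js ih =>
    simp only [pvTrialLoop, List.all_cons, ih]
    by_cases h : PySem.Int.mod i j == 0 <;> simp [h]

theorem pvTrial_eq_prime (i : Int) (h : 2 ≤ i) :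
    pvTrialLoop i (PySem.List.pyRange 2 ((i.toNat.sqrt : Int) + 1) 1)
      = decide (Nat.Prime i.toNat) := by
  rw [pvTrialLoop_eq_all]
  rcases Bool.eq_false_or_eq_true (decide (Nat.Prime i.toNat)) with hp | hp
  · rw [hp]
    have hpr : Nat.Prime i.toNat := by simpa using hp
    rw [List.all_eq_true]
    intro j hj
    rw [PySem.List.mem_pyRange_one] at hj
    have hj2 : 2 ≤ j := hj.1
    have hjs : j ≤ (i.toNat.sqrt : Int) := by omega
    rw [Nat.prime_def_le_sqrt] at hpr
    have hnd := hpr.2 j.toNat (by omega) (by omega)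
    simp only [Bool.not_eq_eq_eq_not, Bool.not_true, beq_eq_false_iff_ne, ne_eq]
    intro hc
    rw [PySem.Int.mod_eq_zero_iff_dvd] at hc
    apply hnd
    exact Int.ofNat_dvd.1 (by rw [Int.toNat_of_nonneg (by omega : (0:Int) ≤ i), Int.toNat_of_nonneg (by omega : (0:Int) ≤ j)]; exact hc)
  · rw [hp]
    have hnp : ¬ Nat.Prime i.toNat := by simpa using hp
    rw [Nat.prime_def_le_sqrt] at hnp
    push Not at hnp
    rcases hnp (by omega) with ⟨d, hd2, hdsqrt, hddvd⟩
    rw [List.all_eq_false]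
    refine ⟨(d : Int), ?_, ?_⟩
    · rw [PySem.List.mem_pyRange_one]
      constructor
      · exact_mod_cast hd2
      · have : (d:Int) ≤ (i.toNat.sqrt : Int) := by exact_mod_cast hdsqrt
        omega
    · have hdvd : (d:Int) ∣ i := by
        have h1 := Int.natCast_dvd_natCast.2 hddvd
        simpa [Int.toNat_of_nonneg (by omega : (0:Int) ≤ i)] using h1
      simp [PySem.Int.mod_eq_zero_iff_dvd, hdvd]

theorem pvPrimesA_eq (n : Int) :
    pvPrimesA n = (PySem.List.pyRange 2 (n + 1) 1).filter
      (fun i => decide (Nat.Prime i.toNat)) := by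
  unfold pvPrimesA
  rw [PySem.List.foldl_append_if
    (fun i => pvTrialLoop i (PySem.List.pyRange 2 ((i.toNat.sqrt : Int) + 1) 1))
    (fun i => i)]
  simp only [List.nil_append, List.map_id']
  exact List.filter_congr (fun i hi => by
    rw [PySem.List.mem_pyRange_one] at hi
    exact pvTrial_eq_prime i hi.1)

-- flag-array basics
theorem pvMark_size (a : Array Bool) (qs : List Int) : (pvMark a qs).size = a.size := by
  induction qs generalizing a with
  | nil => rfl
  | cons q qs ih =>
    rw [pvMark, List.foldl_cons,
      show qs.foldl (fun a q => a.setIfInBounds q.toNat true) (a.setIfInBounds q.toNat true)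
        = pvMark (a.setIfInBounds q.toNat true) qs from rfl,
      ih, Array.size_setIfInBounds]

theorem pvMark_getD (a : Array Bool) (qs : List Int) (j : Nat)
    (h : ∀ x ∈ qs, 0 ≤ x ∧ x.toNat < a.size) :
    (pvMark a qs).getD j false = (a.getD j false || qs.any (fun x => x.toNat == j)) := by
  induction qs generalizing a with
  | nil => simp [pvMark]
  | cons q qs ih =>
    have hq := h q (by simp)
    rw [pvMark, List.foldl_cons, show (qs.foldl (fun a q => a.setIfInBounds q.toNat true) (a.setIfInBounds q.toNat true)) = pvMark (a.setIfInBounds q.toNat true) qs from rfl,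
      ih _ (fun x hx => by have := h x (by simp [hx]); simpa [Array.size_setIfInBounds] using this)]
    simp only [Array.getD_eq_getD_getElem?, Array.getElem?_setIfInBounds, List.any_cons]
    by_cases hqj : q.toNat = j
    · rw [if_pos hqj, if_pos (hqj ▸ hq.2)]
      simp [hqj]
    · rw [if_neg hqj, show (q.toNat == j) = false from beq_eq_false_iff_ne.2 hqj]
      simp

-- q in range(2p, n+1, p)  ↔  p ∣ q ∧ 2p ≤ q ≤ n   (p ≥ 2)
theorem pvMemMul (n p q : Int) (hp : 2 ≤ p) :
    q ∈ PySem.List.pyRange (2 * p) (n + 1) p ↔ p ∣ q ∧ 2 * p ≤ q ∧ q ≤ n := by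
  rw [PySem.List.mem_pyRange_iff_of_pos (by omega)]
  constructor
  · rintro ⟨h1, h2, h3⟩
    have hq : p ∣ q := by
      have := dvd_add h3 (dvd_mul_left p 2)
      simpa using this
    exact ⟨hq, h1, by omega⟩
  · rintro ⟨h1, h2, h3⟩
    exact ⟨h2, by omega, dvd_sub h1 (dvd_mul_left p 2)⟩

-- q in range(p, L+1, p)  ↔  p ∣ q ∧ p ≤ q ≤ L   (p ≥ 2)
theorem pvMemMul1 (L p q : Int) (hp : 2 ≤ p) :
    q ∈ PySem.List.pyRange p (L + 1) p ↔ p ∣ q ∧ p ≤ q ∧ q ≤ L := by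
  rw [PySem.List.mem_pyRange_iff_of_pos (by omega)]
  constructor
  · rintro ⟨h1, h2, h3⟩
    have hq : p ∣ q := by
      have := dvd_add h3 dvd_rfl
      simpa using this
    exact ⟨hq, h1, by omega⟩
  · rintro ⟨h1, h2, h3⟩
    exact ⟨h2, by omega, dvd_sub h1 dvd_rfl⟩

-- 'some x of qs has x.toNat = j' is '(j : Int) ∈ qs' for nonnegative qs
theorem pvAnyToNat (qs : List Int) (j : Nat) (h : ∀ x ∈ qs, 0 ≤ x) :
    (qs.any (fun x => x.toNat == j)) = true ↔ (j : Int) ∈ qs := by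
  rw [List.any_eq_true]
  constructor
  · rintro ⟨x, hx, hxe⟩
    have h0 := h x hx
    have : x = (j : Int) := by
      have := beq_iff_eq.1 hxe
      omega
    exact this ▸ hx
  · intro hj
    exact ⟨(j : Int), hj, by simp⟩

theorem pvContainsIffComposite (n k : Int) (hk : 2 ≤ k) (hkn : k ≤ n)
    (mem : Int → Prop)
    (hmem : ∀ q : Int, mem q ↔ ∃ p : Int, p ∈ PySem.List.pyRange 2 k 1 ∧
      Nat.Prime p.toNat ∧ p ∣ q ∧ 2 * p ≤ q ∧ q ≤ n) :
    mem k ↔ ¬ Nat.Prime k.toNat := by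
  rw [hmem]
  constructor
  · rintro ⟨p, hpm, hpp, hpd, hp2, _⟩ hkp
    rw [PySem.List.mem_pyRange_one] at hpm
    have hdn : p.toNat ∣ k.toNat := by
      rcases hpd with ⟨c, rfl⟩
      exact Int.ofNat_dvd.1 (by
        rw [Int.toNat_of_nonneg (by omega), Int.toNat_of_nonneg (by nlinarith)]
        exact ⟨c, rfl⟩)
    have := (Nat.prime_dvd_prime_iff_eq hpp hkp).1 hdn
    omega
  · intro hnp
    set d := k.toNat.minFac with hd
    have hdp : Nat.Prime d := Nat.minFac_prime (by omega)
    have hddvd : d ∣ k.toNat := Nat.minFac_dvd _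
    have hdne : d ≠ k.toNat := fun hc => hnp (by rw [Nat.prime_def_minFac]; exact ⟨by omega, hc⟩)
    have hdle : d ≤ k.toNat := Nat.le_of_dvd (by omega) hddvd
    have hd2 : 2 ≤ d := hdp.two_le
    have hdvdInt : (d : Int) ∣ k := by
      have := Int.natCast_dvd_natCast.2 hddvd
      simpa [Int.toNat_of_nonneg (by omega : (0:Int) ≤ k)] using this
    refine ⟨(d : Int), ?_, by simpa using hdp, hdvdInt, ?_, hkn⟩
    · rw [PySem.List.mem_pyRange_one]; omega
    · have hsub : (d : Int) ∣ k - d := dvd_sub hdvdInt dvd_rfl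
      have hpos : 0 < k - d := by omega
      have := Int.le_of_dvd hpos hsub
      omega

theorem pvSieve_inv (n : Int) (k : Int) (hk : 2 ≤ k) (hkn : k ≤ n + 1) :
    let st := (PySem.List.pyRange 2 k 1).foldl (pvSieveStep n)
      (Array.replicate (max (n + 1) 1).toNat false, [])
    st.1.size = (n + 1).toNat ∧
    st.2 = (PySem.List.pyRange 2 k 1).filter (fun i => decide (Nat.Prime i.toNat)) ∧
    ∀ j : Nat, st.1.getD j false = true ↔ ∃ p : Int, p ∈ PySem.List.pyRange 2 k 1 ∧
      Nat.Prime p.toNat ∧ p ∣ (j : Int) ∧ 2 * p ≤ (j : Int) ∧ (j : Int) ≤ n := by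
  intro st
  have hn1 : 1 ≤ n := by omega
  obtain ⟨t, rfl⟩ : ∃ t : Nat, k = 2 + (t : Int) := ⟨(k - 2).toNat, by omega⟩
  clear hk
  induction t with
  | zero =>
    simp only [st, Nat.cast_zero, add_zero]
    rw [PySem.List.pyRange_one_eq_nil (by omega)]
    simp only [List.foldl_nil]
    refine ⟨?_, by simp, fun j => ?_⟩
    · rw [Array.size_replicate, max_eq_left (by omega : (1:Int) ≤ n + 1)]
    · rw [Array.getD_eq_getD_getElem?, Array.getElem?_replicate]
      constructor
      · intro h
        exfalso
        revert h
        split <;> simp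
      · rintro ⟨p, hp, -⟩
        simp at hp
  | succ t ih =>
    have hkn' : 2 + (t : Int) ≤ n + 1 := by push_cast at hkn; omega
    have hsplit : PySem.List.pyRange 2 (2 + ((t+1:Nat):Int)) 1
        = PySem.List.pyRange 2 (2 + (t:Int)) 1 ++ [2 + (t:Int)] := by
      have h1 : (2:Int) + ((t+1:Nat):Int) = (2 + (t:Int)) + 1 := by push_cast; ring
      rw [h1, PySem.List.pyRange_one_succ_right (by omega)]
    obtain ⟨ihs, ihl, ihm⟩ := ih hkn'
    set K := 2 + (t : Int) with hK
    set st0 := (PySem.List.pyRange 2 K 1).foldl (pvSieveStep n)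
      (Array.replicate (max (n + 1) 1).toNat false, ([] : List Int)) with hst0
    have hKn : K ≤ n := by push_cast at hkn; omega
    have hK2 : 2 ≤ K := by omega
    have hKcast : ((K.toNat : Nat) : Int) = K := Int.toNat_of_nonneg (by omega)
    have hcomp : st0.1.getD K.toNat false = true ↔ ¬ Nat.Prime K.toNat := by
      rw [ihm K.toNat, hKcast]
      exact pvContainsIffComposite n K (by omega) hKn
        (fun q => ∃ p ∈ PySem.List.pyRange 2 K 1,
          Nat.Prime p.toNat ∧ p ∣ q ∧ 2 * p ≤ q ∧ q ≤ n)
        (fun q => Iff.rfl)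
    simp only [st, hsplit, List.foldl_append, List.foldl_cons, List.foldl_nil]
    rw [← hst0]
    by_cases hpr : Nat.Prime K.toNat
    · have hcf : st0.1.getD K.toNat false = false := by
        rw [Bool.eq_false_iff]
        intro hc
        exact (hcomp.1 hc) hpr
      rw [pvSieveStep, hcf]
      simp only [Bool.not_false, if_pos]
      have hqs : ∀ x ∈ PySem.List.pyRange (2 * K) (n + 1) K, 0 ≤ x ∧ x.toNat < st0.1.size := by
        intro x hx
        rw [pvMemMul n K x hK2] at hx
        refine ⟨by omega, ?_⟩
        rw [ihs]; omega
      refine ⟨by rw [pvMark_size, ihs], ?_, ?_⟩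
      · rw [List.filter_append, ihl]
        simp [hpr]
      · intro j
        rw [pvMark_getD st0.1 _ j hqs]
        rw [Bool.or_eq_true, ihm j]
        have hany := pvAnyToNat (PySem.List.pyRange (2 * K) (n + 1) K) j
          (fun x hx => by have := (pvMemMul n K x hK2).1 hx; omega)
        rw [hany, pvMemMul n K _ hK2]
        constructor
        · rintro (⟨p, hpm, hrest⟩ | ⟨h1, h2, h3⟩)
          · exact ⟨p, by simp [hpm], hrest⟩
          · exact ⟨K, by simp, hpr, h1, h2, h3⟩
        · rintro ⟨p, hpm, hrest⟩
          rcases (List.mem_append.1 hpm) with hpm | hpm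
          · exact Or.inl ⟨p, hpm, hrest⟩
          · simp at hpm
            subst hpm
            exact Or.inr ⟨hrest.2.1, hrest.2.2.1, hrest.2.2.2⟩
    · have hct : st0.1.getD K.toNat false = true := hcomp.2 hpr
      rw [pvSieveStep, hct]
      simp only [Bool.not_true, Bool.false_eq_true, if_false]
      refine ⟨ihs, ?_, ?_⟩
      · rw [List.filter_append, ihl]
        simp [hpr]
      · intro j
        rw [ihm j]
        constructor
        · rintro ⟨p, hpm, hrest⟩
          exact ⟨p, by simp [hpm], hrest⟩
        · rintro ⟨p, hpm, hrest⟩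
          rcases (List.mem_append.1 hpm) with hpm | hpm
          · exact ⟨p, hpm, hrest⟩
          · simp at hpm
            subst hpm
            exact absurd hrest.1 hpr

theorem pvPrimesB_eq (n : Int) (hn : 2 ≤ n) :
    ((PySem.List.pyRange 2 (n + 1) 1).foldl (pvSieveStep n)
      (Array.replicate (max (n + 1) 1).toNat false, [])).2 = pvPrimesA n := by
  rw [(pvSieve_inv n (n + 1) (by omega) (by omega)).2.1, pvPrimesA_eq]

-- the marking sieve over [1, L]: flag q set iff some listed prime divides q
theorem pvMarked_get (primes : List Int) (hpos : ∀ p ∈ primes, 2 ≤ p) (L : Int)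
    (hL : 0 ≤ L) (j : Nat) :
    ((primes.foldl (fun a p => pvMark a (PySem.List.pyRange p (L + 1) p))
      (Array.replicate (L + 1).toNat false)).getD j false) = true
    ↔ ∃ p ∈ primes, p ∣ (j : Int) ∧ p ≤ (j : Int) ∧ (j : Int) ≤ L := by
  have key : ∀ (l : List Int) (a : Array Bool), (∀ p ∈ l, 2 ≤ p) → a.size = (L + 1).toNat →
      ((l.foldl (fun a p => pvMark a (PySem.List.pyRange p (L + 1) p)) a).getD j false = true
        ↔ a.getD j false = true ∨ ∃ p ∈ l, p ∣ (j : Int) ∧ p ≤ (j : Int) ∧ (j : Int) ≤ L) := by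
    intro l
    induction l with
    | nil => simp
    | cons p ps ih =>
      intro a hl hsz
      have hp : 2 ≤ p := hl p (by simp)
      have hqs : ∀ x ∈ PySem.List.pyRange p (L + 1) p, 0 ≤ x ∧ x.toNat < a.size := by
        intro x hx
        rw [pvMemMul1 L p x hp] at hx
        refine ⟨by omega, by rw [hsz]; omega⟩
      rw [List.foldl_cons, ih _ (fun x hx => hl x (by simp [hx]))
        (by rw [pvMark_size, hsz])]
      rw [pvMark_getD a _ j hqs, Bool.or_eq_true,
        pvAnyToNat _ j (fun x hx => by have := (pvMemMul1 L p x hp).1 hx; omega),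
        pvMemMul1 L p _ hp]
      constructor
      · rintro ((ha | hr) | ⟨r, hrm, hrest⟩)
        · exact Or.inl ha
        · exact Or.inr ⟨p, by simp, hr⟩
        · exact Or.inr ⟨r, by simp [hrm], hrest⟩
      · rintro (ha | ⟨r, hrm, hrest⟩)
        · exact Or.inl (Or.inl ha)
        · rcases List.mem_cons.1 hrm with rfl | hr'
          · exact Or.inl (Or.inr hrest)
          · exact Or.inr ⟨r, hr', hrest⟩
  rw [key primes _ hpos (by simp)]
  simp only [Array.getD_eq_getD_getElem?, Array.getElem?_replicate]
  constructor
  · rintro (h | h)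
    · revert h; split <;> simp
    · exact h
  · exact Or.inr

theorem pvWhileA_eq (primes : List Int) (m : Int) (fuel : Nat) :
    ∀ (i : Int) (res : List Int),
    m ≤ res.length + ((PySem.List.pyRange i (i + fuel) 1).filter (pvCond primes)).length →
    pvWhileA primes m fuel i res =
      res ++ ((PySem.List.pyRange i (i + fuel) 1).filter (pvCond primes)).take
        (m - res.length).toNat := by
  induction fuel with
  | zero =>
    intro i res h
    simp only [pvWhileA]
    rw [PySem.List.pyRange_one_eq_nil (by omega)] at h ⊢
    simp at h ⊢
  | succ fuel ih =>
    intro i res h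
    rw [PySem.List.pyRange_one_cons (by push_cast; omega)] at h ⊢
    have hr : PySem.List.pyRange (i+1) (i + ((fuel:Int)+1)) 1
        = PySem.List.pyRange (i+1) ((i+1) + (fuel:Int)) 1 := by ring_nf
    push_cast at h ⊢
    rw [hr] at h ⊢
    by_cases hlt : (res.length : Int) < m
    · simp only [pvWhileA, if_pos hlt, pvDivLoop_eq]
      by_cases hc : pvCond primes i
      · simp only [List.filter_cons, hc, if_pos, List.length_cons] at h ⊢
        rw [ih (i+1) (res ++ [i]) (by simp; push_cast at h; omega)]
        have ht : (m - res.length).toNat = ((m - ((res ++ [i]).length : Int)).toNat) + 1 := by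
          simp; omega
        rw [ht, List.take_succ_cons]
        simp
      · simp only [List.filter_cons, hc, Bool.false_eq_true, if_false] at h ⊢
        exact ih (i+1) res h
    · simp only [pvWhileA, if_neg hlt]
      have : (m - res.length).toNat = 0 := by omega
      simp [this]

theorem pvDensity (primes : List Int) (h2 : (2 : Int) ∈ primes) (j : Nat) :
    (j : Int) ≤ (((PySem.List.pyRange 1 (2 * j + 1) 1).filter (pvCond primes)).length : Int) := by
  induction j with
  | zero => simp
  | succ j ih =>
    have hsplit : PySem.List.pyRange (1:Int) (2 * ((j:Int)+1) + 1) 1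
        = PySem.List.pyRange 1 (2 * (j:Int) + 1) 1 ++ [2*(j:Int)+1, 2*(j:Int)+2] := by
      rw [PySem.List.pyRange_one_append 1 (2*(j:Int)+1) (2*((j:Int)+1)+1) (by omega) (by omega)]
      congr 1
      rw [PySem.List.pyRange_one_cons (by omega),
          PySem.List.pyRange_one_cons (by omega),
          PySem.List.pyRange_one_eq_nil (by omega)]
      simp
      omega
    have hc : pvCond primes (2*(j:Int)+2) = true := by
      simp only [pvCond, List.any_eq_true]
      refine ⟨2, h2, ?_⟩
      have : (2:Int) ∣ 2*(j:Int)+2 := ⟨(j:Int)+1, by ring⟩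
      simp [this]
    push_cast
    rw [hsplit, List.filter_append]
    simp only [List.length_append]
    have : 1 ≤ (([2*(j:Int)+1, 2*(j:Int)+2].filter (pvCond primes)).length : Int) := by
      simp only [List.filter_cons, List.filter_nil, hc]
      by_cases h1 : pvCond primes (2*(j:Int)+1) <;> simp [h1]
    push_cast at ih ⊢
    omega

theorem pvPrimesA_pos (n : Int) : ∀ p ∈ pvPrimesA n, 2 ≤ p := by
  intro p hp
  rw [pvPrimesA_eq] at hp
  have := List.mem_of_mem_filter hp
  rw [PySem.List.mem_pyRange_one] at this
  exact this.1

theorem pvTwo_mem_primesA (n : Int) (hn : 2 ≤ n) : (2 : Int) ∈ pvPrimesA n := by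
  rw [pvPrimesA_eq, List.mem_filter]
  refine ⟨?_, by decide⟩
  rw [PySem.List.mem_pyRange_one]
  omega

-- ===== VERDICT (by name: the statement is the Claim_ definition above) =====

-- ===== VERDICT (by name: the statement is the Claim_ definition above) =====
theorem generate_array_spec : Claim_equal_generate_array := by
  intro n m _ hpre
  unfold Spec_generate_array generate_array generate_array_alt
  by_cases hm : m ≤ 0
  · have h0 : (2 * m).toNat = 0 := by omega
    rw [h0, if_pos hm]
    rfl
  · have hmpos : 0 < m := by omega
    have hn : 2 ≤ n := hpre hmpos
    rw [if_neg hm]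
    dsimp only
    rw [pvPrimesB_eq n hn]
    set primes := pvPrimesA n with hprimes
    have hpos := pvPrimesA_pos n
    have h2 := pvTwo_mem_primesA n hn
    have hfilt : (PySem.List.pyRange 1 (2 * m + 1) 1).filter
        (fun i => (primes.foldl
          (fun a p => pvMark a (PySem.List.pyRange p (2 * m + 1) p))
          (Array.replicate (2 * m + 1).toNat false)).getD i.toNat false)
        = (PySem.List.pyRange 1 (2 * m + 1) 1).filter (pvCond primes) := by
      refine List.filter_congr (fun i hi => ?_)
      rw [PySem.List.mem_pyRange_one] at hi
      rw [Bool.eq_iff_iff, pvMarked_get primes hpos (2 * m) (by omega) i.toNat]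
      rw [Int.toNat_of_nonneg (by omega : (0:Int) ≤ i)]
      constructor
      · rintro ⟨p, hp, hdvd, _, _⟩
        simp only [pvCond, List.any_eq_true]
        exact ⟨p, hp, by simpa using hdvd⟩
      · intro hc
        simp only [pvCond, List.any_eq_true] at hc
        rcases hc with ⟨p, hp, hdvd⟩
        have hdvd' : p ∣ i := by simpa using hdvd
        exact ⟨p, hp, hdvd', Int.le_of_dvd (by omega) hdvd', by omega⟩
    rw [hfilt]
    have hwin : (1 : Int) + ((2 * m).toNat : Nat) = 2 * m + 1 := by omega
    have hdens : m ≤ (([] : List Int).length : Int) +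
        ((PySem.List.pyRange 1 (1 + ((2 * m).toNat : Nat)) 1).filter (pvCond primes)).length := by
      rw [hwin]
      have hd := pvDensity primes h2 m.toNat
      have hcast : (2 * ((m.toNat : Nat) : Int) + 1) = 2 * m + 1 := by omega
      rw [hcast] at hd
      simp only [List.length_nil, Nat.cast_zero, zero_add]
      omega
    rw [pvWhileA_eq primes m (2 * m).toNat 1 [] hdens, hwin]
    simp
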